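-- pv_equiv track=rewrite | github.com/Pengppi/algorithm-practice | leetcode/src/main/python/leetcode/editor/cn/购买物品的最大开销maximumSpendingAfterBuyingItems.py | maxSpending
-- ===== SOURCE A (Python) =====
-- import heapq
-- from typing import List
--
-- def maxSpending(values: List[List[int]]) -> int:
--     m, n = len(values), len(values[0])
--     q = []
--     for i in range(m):
--         q.append((values[i][n - 1], i, n - 1))
--     heapq.heapify(q)
--     ans = 0
--     for i in range(1, m * n + 1):
--         w, x, y = heapq.heappop(q)
--         ans += i * w
--         if y > 0:
--             heapq.heappush(q, (values[x][y - 1], x, y - 1))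
--     return ans
-- ===== SOURCE B (Python) =====
-- from typing import List
--
-- def maxSpending(values: List[List[int]]) -> int:
--     # Pointer-per-row repeated-minimum scan instead of a heap: each row is
--     # consumed right-to-left; each step picks the row minimizing
--     # (values[r][ptrs[r]], r), which is exactly the heap's tuple order.
--     m, n = len(values), len(values[0])
--     ptrs = [n - 1] * m
--     ans = 0
--     for i in range(1, m * n + 1):
--         w, r = min((values[r][ptrs[r]], r) for r in range(m) if ptrs[r] >= 0)
--         ans += i * w
--         ptrs[r] -= 1
--     return ans
-- ===== Notes on version B (the rewrite author's own statement) =====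
-- stated objective: simpler
-- what changed: Replaces the heap (heapify/heappop/heappush of (value,row,col) triples) with a per-row pointer array and a repeated linear minimum scan over (value,row) pairs, consuming each row right-to-left.
import Mathlib
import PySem

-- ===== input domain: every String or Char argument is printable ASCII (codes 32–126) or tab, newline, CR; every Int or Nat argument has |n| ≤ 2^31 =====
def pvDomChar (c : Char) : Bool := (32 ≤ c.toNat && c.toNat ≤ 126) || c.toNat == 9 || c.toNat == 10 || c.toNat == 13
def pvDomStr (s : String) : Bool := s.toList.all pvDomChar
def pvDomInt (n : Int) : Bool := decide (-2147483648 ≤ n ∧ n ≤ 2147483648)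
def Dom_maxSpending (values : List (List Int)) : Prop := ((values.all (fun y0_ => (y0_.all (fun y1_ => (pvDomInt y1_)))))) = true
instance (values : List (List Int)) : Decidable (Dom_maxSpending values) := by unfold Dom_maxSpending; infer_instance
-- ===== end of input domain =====

-- B replaces A's heap with a per-row pointer array and a repeated linear minimum scan
-- (objective: simpler — no heap machinery, one comprehension + min per step); same return value.

-- ===== PORT A =====
-- values[x][y] (Python indexing, negative from the end); default 0 only where Python
-- would raise IndexError — such inputs are excluded by Pre_maxSpending.
def pvGet2 (values : List (List Int)) (x y : Int) : Int :=
  (PySem.List.pyGet? ((PySem.List.pyGet? values x).getD []) y).getD 0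

-- Python's tuple '<' on (int, int, int): strict lexicographic order.
def pvLt3 (a b : Int × Int × Int) : Bool :=
  decide (a.1 < b.1) || (a.1 == b.1 && (decide (a.2.1 < b.2.1) || (a.2.1 == b.2.1 && decide (a.2.2 < b.2.2))))

-- heapq model: heappop returns the least tuple and the remaining multiset.  The heap's
-- entries always have pairwise-distinct middle components (row indices), so the least
-- tuple is unique and this pop-the-minimum model is exact for heapify/heappop/heappush.
def pvPopMin3 : List (Int × Int × Int) → Option ((Int × Int × Int) × List (Int × Int × Int))
  | [] => none
  | a :: rest =>
    match pvPopMin3 rest with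
    | none => some (a, [])
    | some (b, r') => if pvLt3 b a then some (b, a :: r') else some (a, rest)

-- one iteration of A's loop: w, x, y = heappop(q); ans += i*w; if y > 0: heappush(q, …)
def pvHeapStep (values : List (List Int)) (st : List (Int × Int × Int) × Int) (i : Int) :
    List (Int × Int × Int) × Int :=
  match pvPopMin3 st.1 with
  | none => st  -- Python heappop raises IndexError on an empty heap (never reached inside Pre_)
  | some ((w, x, y), q') =>
    if y > 0 then ((pvGet2 values x (y - 1), x, y - 1) :: q', st.2 + i * w)
    else (q', st.2 + i * w)

def maxSpending (values : List (List Int)) : Int :=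
  let m : Nat := values.length
  let n : Nat := (values.headD []).length
  -- q = [(values[i][n-1], i, n-1) for i in range(m)]; heapify(q) (a no-op in the multiset model)
  let q : List (Int × Int × Int) :=
    (List.range m).map (fun (i : Nat) => (pvGet2 values i ((n : Int) - 1), (i : Int), (n : Int) - 1))
  ((PySem.List.pyRange 1 ((m : Int) * (n : Int) + 1) 1).foldl (pvHeapStep values) (q, 0)).2

-- ===== PORT B =====
-- one iteration of B's loop: w, r = min((values[r][ptrs[r]], r) for r in range(m) if ptrs[r] >= 0);
-- ans += i*w; ptrs[r] -= 1
def pvScanStep (values : List (List Int)) (st : List Int × Int) (i : Int) : List Int × Int :=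
  let cands : List (Int × Int) :=
    (List.range values.length).filterMap (fun (r : Nat) =>
      let p := (PySem.List.pyGet? st.1 (r : Int)).getD 0  -- ptrs[r]; r < len(ptrs) throughout
      if 0 ≤ p then some (pvGet2 values r p, (r : Int)) else none)
  match PySem.List.min2? cands Prod.fst Prod.snd with
  | none => st  -- Python min raises ValueError on an empty sequence (never reached inside Pre_)
  | some (w, r) =>
    -- ptrs[r] -= 1 ; r is a row produced by the scan, so 0 ≤ r < len(ptrs) and .toNat is exact
    (st.1.set r.toNat (((PySem.List.pyGet? st.1 r).getD 0) - 1), st.2 + i * w)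

def maxSpending_alt (values : List (List Int)) : Int :=
  let m : Nat := values.length
  let n : Nat := (values.headD []).length
  -- ptrs = [n - 1] * m
  ((PySem.List.pyRange 1 ((m : Int) * (n : Int) + 1) 1).foldl (pvScanStep values)
      (List.replicate m ((n : Int) - 1), 0)).2

-- ===== PRECONDITION & SPEC =====
-- Pre_ excludes exactly the inputs on which Python A raises IndexError: the empty list,
-- and inputs where some row is shorter than the first row (indices n-1..0 are read in every row).
def Pre_maxSpending (values : List (List Int)) : Prop :=
  values ≠ [] ∧ 0 < (values.headD []).length ∧
    ∀ row ∈ values, (values.headD []).length ≤ row.length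
instance (values : List (List Int)) : Decidable (Pre_maxSpending values) := by
  unfold Pre_maxSpending; infer_instance
def pvWitness_maxSpending : List (List Int) := [[3, 1], [2, 2]]

def Spec_maxSpending (values : List (List Int)) (out : Int) : Prop := out = maxSpending_alt values
instance (values : List (List Int)) (out : Int) : Decidable (Spec_maxSpending values out) := by
  unfold Spec_maxSpending; infer_instance

-- ===== CLAIM (what is proved, stated in full; the proofs are below) =====
def Claim_equal_maxSpending : Prop := ∀ (values : List (List Int)), Dom_maxSpending values →
  Pre_maxSpending values → Spec_maxSpending values (maxSpending values)

-- ===== LEMMAS AND PROOFS =====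

-- the candidate multiset determined by the pointer array: one triple per row with ptr ≥ 0
def pvCands (values : List (List Int)) : List Int → Nat → List (Int × Int × Int)
  | [], _ => []
  | p :: rest, r =>
      (if 0 ≤ p then [(pvGet2 values r p, (r : Int), p)] else []) ++ pvCands values rest (r + 1)

-- number of future pops the pointer array still owes
def pvWsum : List Int → Int
  | [] => 0
  | p :: rest => (if 0 ≤ p then p + 1 else 0) + pvWsum rest

theorem pvLt3_iff (a b : Int × Int × Int) : pvLt3 a b = true ↔
    (a.1 < b.1 ∨ (a.1 = b.1 ∧ (a.2.1 < b.2.1 ∨ (a.2.1 = b.2.1 ∧ a.2.2 < b.2.2)))) := by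
  simp [pvLt3]

theorem pvLt3_false_iff (a b : Int × Int × Int) : pvLt3 a b = false ↔
    ¬ (a.1 < b.1 ∨ (a.1 = b.1 ∧ (a.2.1 < b.2.1 ∨ (a.2.1 = b.2.1 ∧ a.2.2 < b.2.2)))) := by
  rw [← pvLt3_iff]; exact Bool.eq_false_iff.trans (Iff.rfl)

theorem pvPopMin3_eq_none {l : List (Int × Int × Int)} : pvPopMin3 l = none ↔ l = [] := by
  cases l with
  | nil => simp [pvPopMin3]
  | cons a rest =>
    simp only [pvPopMin3]
    constructor
    · intro h
      cases hr : pvPopMin3 rest with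
      | none => rw [hr] at h; simp at h
      | some br =>
        rw [hr] at h; obtain ⟨b, r'⟩ := br
        have h : (if pvLt3 b a = true then some (b, a :: r') else some (a, rest)) = none := h
        split at h <;> exact absurd h (Option.some_ne_none _)
    · intro h; exact (List.cons_ne_nil a rest h).elim

theorem pvPopMin3_spec {l : List (Int × Int × Int)} {e : Int × Int × Int}
    {t : List (Int × Int × Int)} (h : pvPopMin3 l = some (e, t)) :
    e ∈ l ∧ t.Perm (l.erase e) ∧ ∀ a ∈ l, pvLt3 a e = false := by
  induction l generalizing e t with
  | nil => simp [pvPopMin3] at h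
  | cons a rest ih =>
    rw [pvPopMin3] at h
    cases hr : pvPopMin3 rest with
    | none =>
      rw [hr] at h
      have hrest : rest = [] := pvPopMin3_eq_none.mp hr
      have h : some (a, ([] : List (Int × Int × Int))) = some (e, t) := h
      simp only [Option.some.injEq, Prod.mk.injEq] at h
      obtain ⟨he, ht⟩ := h
      subst he; subst ht; subst hrest
      refine ⟨by simp, by simp, ?_⟩
      intro x hx
      simp at hx; subst hx
      rw [pvLt3_false_iff]; omega
    | some br =>
      obtain ⟨b, r'⟩ := br
      rw [hr] at h
      have h : (if pvLt3 b a = true then some (b, a :: r') else some (a, rest)) = some (e, t) := h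
      obtain ⟨hbmem, hbperm, hbmin⟩ := ih hr
      by_cases hc : pvLt3 b a = true
      · rw [if_pos hc] at h
        simp only [Option.some.injEq, Prod.mk.injEq] at h
        obtain ⟨he, ht⟩ := h
        subst he; subst ht
        have hne : ¬ a = b := by
          intro hab; subst hab
          rw [pvLt3_iff] at hc; omega
        refine ⟨List.mem_cons_of_mem _ hbmem, ?_, ?_⟩
        · rw [List.erase_cons_tail (by simp [hne] : ¬ (a == b) = true)]
          exact hbperm.cons a
        · intro x hx
          rcases List.mem_cons.mp hx with hx | hx
          · subst hx
            rw [pvLt3_false_iff]; rw [pvLt3_iff] at hc; omega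
          · exact hbmin x hx
      · rw [if_neg hc] at h
        simp only [Option.some.injEq, Prod.mk.injEq] at h
        obtain ⟨he, ht⟩ := h
        subst he; subst ht
        refine ⟨List.mem_cons_self, ?_, ?_⟩
        · rw [List.erase_cons_head]
        · intro x hx
          rcases List.mem_cons.mp hx with hx | hx
          · subst hx; rw [pvLt3_false_iff]; omega
          · have h1 := hbmin x hx
            have h2 : pvLt3 b a = false := Bool.eq_false_iff.mpr hc
            rw [pvLt3_false_iff] at h1 h2 ⊢
            omega

-- the fold step of Python min over (int, int) pairs, in propositional form
def pvMinStep (acc : Option (Int × Int)) (x : Int × Int) : Option (Int × Int) :=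
  match acc with
  | none => some x
  | some m => if x.1 < m.1 ∨ (x.1 = m.1 ∧ x.2 < m.2) then some x else some m

theorem pvMin2?_eq (xs : List (Int × Int)) :
    PySem.List.min2? xs Prod.fst Prod.snd = xs.foldl pvMinStep none := by
  unfold PySem.List.min2?
  congr 1
  funext acc x
  cases acc with
  | none => rfl
  | some m =>
    simp only [pvMinStep]
    have hb : ((decide (x.1 < m.1) || (!decide (m.1 < x.1) && decide (x.2 < m.2))) = true)
        ↔ (x.1 < m.1 ∨ (x.1 = m.1 ∧ x.2 < m.2)) := by
      simp only [Bool.or_eq_true, Bool.and_eq_true, Bool.not_eq_true', decide_eq_true_iff,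
        decide_eq_false_iff_not]
      omega
    by_cases hp : x.1 < m.1 ∨ (x.1 = m.1 ∧ x.2 < m.2)
    · rw [if_pos hp, if_pos (hb.mpr hp)]
    · rw [if_neg hp, if_neg (fun hh => hp (hb.mp hh))]

theorem pvFoldl_minStep_some : ∀ (xs : List (Int × Int)) (m0 : Int × Int),
    ∃ m, xs.foldl pvMinStep (some m0) = some m := by
  intro xs
  induction xs with
  | nil => exact fun m0 => ⟨m0, rfl⟩
  | cons x t ih =>
    intro m0
    rw [List.foldl_cons]
    show ∃ m, (t.foldl pvMinStep (pvMinStep (some m0) x)) = some m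
    rw [pvMinStep]
    split <;> exact ih _

theorem pvFoldl_minStep_spec : ∀ (xs : List (Int × Int)) (m0 m : Int × Int),
    xs.foldl pvMinStep (some m0) = some m →
    (m = m0 ∨ m ∈ xs) ∧ ¬ (m0.1 < m.1 ∨ (m0.1 = m.1 ∧ m0.2 < m.2)) ∧
      ∀ y ∈ xs, ¬ (y.1 < m.1 ∨ (y.1 = m.1 ∧ y.2 < m.2)) := by
  intro xs
  induction xs with
  | nil =>
    intro m0 m h
    simp only [List.foldl_nil, Option.some.injEq] at h
    subst h
    exact ⟨Or.inl rfl, by omega, by simp⟩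
  | cons x t ih =>
    intro m0 m h
    rw [List.foldl_cons] at h
    have h : t.foldl pvMinStep (pvMinStep (some m0) x) = some m := h
    rw [pvMinStep] at h
    by_cases hc : x.1 < m0.1 ∨ (x.1 = m0.1 ∧ x.2 < m0.2)
    · rw [if_pos hc] at h
      obtain ⟨hmem, hmin1, hmin⟩ := ih x m h
      refine ⟨?_, by omega, ?_⟩
      · rcases hmem with rfl | hm
        · exact Or.inr List.mem_cons_self
        · exact Or.inr (List.mem_cons_of_mem _ hm)
      · intro y hy
        rcases List.mem_cons.mp hy with rfl | hy
        · exact hmin1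
        · exact hmin y hy
    · rw [if_neg hc] at h
      obtain ⟨hmem, hmin1, hmin⟩ := ih m0 m h
      refine ⟨?_, hmin1, ?_⟩
      · rcases hmem with rfl | hm
        · exact Or.inl rfl
        · exact Or.inr (List.mem_cons_of_mem _ hm)
      · intro y hy
        rcases List.mem_cons.mp hy with rfl | hy
        · omega
        · exact hmin y hy

theorem pvMin2?_some {xs : List (Int × Int)} (h : xs ≠ []) :
    ∃ m, PySem.List.min2? xs Prod.fst Prod.snd = some m := by
  rw [pvMin2?_eq]
  cases xs with
  | nil => exact absurd rfl h
  | cons x t =>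
    rw [List.foldl_cons]
    exact pvFoldl_minStep_some t x

theorem pvMin2?_spec {xs : List (Int × Int)} {m : Int × Int}
    (h : PySem.List.min2? xs Prod.fst Prod.snd = some m) :
    m ∈ xs ∧ ∀ y ∈ xs, ¬ (y.1 < m.1 ∨ (y.1 = m.1 ∧ y.2 < m.2)) := by
  rw [pvMin2?_eq] at h
  cases xs with
  | nil => simp at h
  | cons x t =>
    rw [List.foldl_cons] at h
    obtain ⟨hmem, hmin1, hmin⟩ := pvFoldl_minStep_spec t x m h
    refine ⟨?_, ?_⟩
    · rcases hmem with rfl | hm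
      · exact List.mem_cons_self
      · exact List.mem_cons_of_mem _ hm
    · intro y hy
      rcases List.mem_cons.mp hy with rfl | hy
      · exact hmin1
      · exact hmin y hy

theorem mem_pvCands {values : List (List Int)} {e : Int × Int × Int} :
    ∀ (ptrs : List Int) (c : Nat), e ∈ pvCands values ptrs c →
    ∃ k, ∃ hk : k < ptrs.length, 0 ≤ ptrs[k] ∧
      e = (pvGet2 values (c + k) ptrs[k], ((c : Int) + (k : Int)), ptrs[k]) := by
  intro ptrs
  induction ptrs with
  | nil => intro c h; simp [pvCands] at h
  | cons p rest ih =>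
    intro c h
    rw [pvCands] at h
    rcases List.mem_append.mp h with h | h
    · by_cases hp : 0 ≤ p
      · rw [if_pos hp] at h
        simp only [List.mem_singleton] at h
        exact ⟨0, by simp, by simpa using hp, by simpa using h⟩
      · rw [if_neg hp] at h; simp at h
    · obtain ⟨k, hk, hpk, he⟩ := ih (c + 1) h
      refine ⟨k + 1, by simpa using hk, by simpa using hpk, ?_⟩
      rw [he]
      have h3 : (((c + 1 : Nat)) : Int) + (k : Int) = (c : Int) + (((k + 1 : Nat)) : Int) := by
        push_cast; ring
      rw [h3]
      simp only [List.getElem_cons_succ]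

theorem pvCands_ne_nil {values : List (List Int)} {ptrs : List Int} {c : Nat}
    (h : pvWsum ptrs ≠ 0) : pvCands values ptrs c ≠ [] := by
  induction ptrs generalizing c with
  | nil => simp [pvWsum] at h
  | cons p rest ih =>
    rw [pvCands]
    by_cases hp : 0 ≤ p
    · rw [if_pos hp]; simp
    · rw [if_neg hp]
      rw [pvWsum, if_neg hp, zero_add] at h
      simpa using ih (c := c + 1) h

theorem pvWsum_set : ∀ (ptrs : List Int) (k : Nat) (hk : k < ptrs.length), 0 ≤ ptrs[k] →
    pvWsum (ptrs.set k (ptrs[k] - 1)) = pvWsum ptrs - 1 := by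
  intro ptrs
  induction ptrs with
  | nil => intro k hk; simp at hk
  | cons p rest ih =>
    intro k hk hp
    cases k with
    | zero =>
      simp only [List.getElem_cons_zero] at hp
      simp only [List.set_cons_zero, List.getElem_cons_zero, pvWsum]
      split_ifs <;> omega
    | succ k =>
      simp only [List.getElem_cons_succ] at hp
      simp only [List.set_cons_succ, List.getElem_cons_succ, pvWsum]
      rw [ih k (by simpa using hk) hp]
      ring

theorem pvCands_set {values : List (List Int)} :
    ∀ (ptrs : List Int) (k : Nat) (c : Nat) (hk : k < ptrs.length), 0 ≤ ptrs[k] →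
    (pvCands values (ptrs.set k (ptrs[k] - 1)) c).Perm
      ((if 0 ≤ ptrs[k] - 1 then
          [(pvGet2 values (c + k) (ptrs[k] - 1), ((c : Int) + (k : Int)), ptrs[k] - 1)] else []) ++
        (pvCands values ptrs c).erase
          (pvGet2 values (c + k) ptrs[k], ((c : Int) + (k : Int)), ptrs[k])) := by
  intro ptrs
  induction ptrs with
  | nil => intro k c hk; simp at hk
  | cons p rest ih =>
    intro k c hk hp
    cases k with
    | zero =>
      simp only [List.getElem_cons_zero] at hp ⊢
      simp only [List.set_cons_zero]
      rw [pvCands, pvCands, if_pos hp]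
      simp only [Nat.cast_zero, add_zero, Nat.add_zero]
      rw [List.singleton_append, List.erase_cons_head]
    | succ k =>
      simp only [List.getElem_cons_succ] at hp ⊢
      simp only [List.set_cons_succ]
      rw [pvCands, pvCands]
      have hkr : k < rest.length := by simpa using hk
      have h3 : (((c + 1 : Nat)) : Int) + (k : Int) = (c : Int) + (((k + 1 : Nat)) : Int) := by
        push_cast; ring
      have hmain := ih k (c + 1) hkr hp
      rw [h3] at hmain
      have hne : ¬ ((pvGet2 values (c : Int) p, (c : Int), p) ==
          (pvGet2 values ((c : Int) + ((k + 1 : Nat) : Int)) rest[k],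
            (c : Int) + ((k + 1 : Nat) : Int), rest[k])) = true := by
        simp only [beq_iff_eq]
        intro heq
        have := congrArg (fun t => t.2.1) heq
        simp at this
        omega
      by_cases hq : 0 ≤ p
      · rw [if_pos hq]
        rw [List.singleton_append, List.singleton_append, List.erase_cons_tail hne]
        refine (hmain.cons _).trans ?_
        by_cases hq2 : 0 ≤ rest[k] - 1
        · rw [if_pos hq2]
          simp only [List.singleton_append, List.cons_append]
          exact List.Perm.swap _ _ _
        · rw [if_neg hq2]
          simp
      · rw [if_neg hq]
        simpa using hmain

theorem pvCandsB_eq (values : List (List Int)) (ptrs : List Int) :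
    (List.range ptrs.length).filterMap (fun (r : Nat) =>
        if 0 ≤ (PySem.List.pyGet? ptrs (r : Int)).getD 0 then
          some (pvGet2 values r ((PySem.List.pyGet? ptrs (r : Int)).getD 0), (r : Int))
        else none)
      = (pvCands values ptrs 0).map (fun e => (e.1, e.2.1)) := by
  have aux : ∀ (ptrs : List Int) (c : Nat),
      (List.range ptrs.length).filterMap (fun (r : Nat) =>
          if 0 ≤ (PySem.List.pyGet? ptrs (r : Int)).getD 0 then
            some (pvGet2 values (c + r) ((PySem.List.pyGet? ptrs (r : Int)).getD 0),
              ((c : Int) + (r : Int)))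
          else none)
        = (pvCands values ptrs c).map (fun e => (e.1, e.2.1)) := by
    intro ptrs
    induction ptrs with
    | nil => intro c; simp [pvCands]
    | cons p rest ih =>
      intro c
      rw [List.length_cons, List.range_succ_eq_map, List.filterMap_cons, List.filterMap_map]
      have h0 : (PySem.List.pyGet? (p :: rest) ((0 : Nat) : Int)).getD 0 = p := by
        simp [PySem.List.pyGet?_zero_cons]
      rw [pvCands]
      have hsucc : ∀ (r : Nat),
          PySem.List.pyGet? (p :: rest) ((Nat.succ r : Nat) : Int) = PySem.List.pyGet? rest (r : Int) := by
        intro r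
        have hc : ((Nat.succ r : Nat) : Int) = (r : Int) + 1 := by push_cast; ring
        rw [hc]
        exact PySem.List.pyGet?_cons_succ (x := p) (xs := rest) (n := r)
      have hrest : (List.range rest.length).filterMap ((fun (r : Nat) =>
            if 0 ≤ (PySem.List.pyGet? (p :: rest) (r : Int)).getD 0 then
              some (pvGet2 values (c + r) ((PySem.List.pyGet? (p :: rest) (r : Int)).getD 0),
                ((c : Int) + (r : Int)))
            else none) ∘ Nat.succ)
          = (pvCands values rest (c + 1)).map (fun e => (e.1, e.2.1)) := by
        rw [← ih (c + 1)]
        apply List.filterMap_congr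
        intro r _
        simp only [Function.comp_apply, hsucc r]
        have e1 : c + Nat.succ r = (c + 1) + r := by omega
        have e2 : (c : Int) + ((Nat.succ r : Nat) : Int) = (((c + 1 : Nat)) : Int) + (r : Int) := by
          push_cast; ring
        rw [e2]
      by_cases hp : 0 ≤ p
      · rw [if_pos hp]
        simp only [h0, if_pos hp, hrest]
        simp [Nat.add_zero]
      · rw [if_neg hp]
        simp only [h0, if_neg hp, hrest]
        simp
  have := aux ptrs 0
  simp only [Nat.zero_add, Nat.cast_zero, zero_add] at this
  rw [← this]

theorem pvCands_replicate (values : List (List Int)) {x : Int} (hx : 0 ≤ x) :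
    ∀ (m : Nat) (c : Nat), pvCands values (List.replicate m x) c
      = (List.range m).map (fun (i : Nat) => (pvGet2 values (c + i) x, ((c : Int) + (i : Int)), x)) := by
  intro m
  induction m with
  | zero => intro c; simp [pvCands]
  | succ m ih =>
    intro c
    rw [List.replicate_succ, pvCands, if_pos hx, List.singleton_append, ih (c + 1),
      List.range_succ_eq_map, List.map_cons, List.map_map]
    refine congrArg₂ List.cons ?_ ?_
    · simp
    · apply List.map_congr_left
      intro a ha
      simp only [Function.comp_apply]
      have e : ((c + 1 : Nat) : Int) + (a : Int) = (c : Int) + ((Nat.succ a : Nat) : Int) := by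
        push_cast; ring
      rw [e]

theorem pvWsum_replicate {x : Int} (hx : 0 ≤ x) :
    ∀ (m : Nat), pvWsum (List.replicate m x) = m * (x + 1) := by
  intro m
  induction m with
  | zero => simp [pvWsum]
  | succ m ih =>
    rw [List.replicate_succ, pvWsum, if_pos hx, ih]
    push_cast
    ring

theorem pvLoop_eq (values : List (List Int)) :
    ∀ (is : List Int) (q : List (Int × Int × Int)) (ptrs : List Int) (ans : Int),
    ptrs.length = values.length → q.Perm (pvCands values ptrs 0) →
    pvWsum ptrs = (is.length : Int) →
    (is.foldl (pvHeapStep values) (q, ans)).2 = (is.foldl (pvScanStep values) (ptrs, ans)).2 := by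
  intro is
  induction is with
  | nil => intro q ptrs ans _ _ _; rfl
  | cons i is' ih =>
    intro q ptrs ans hlen hq hw
    have hwne : pvWsum ptrs ≠ 0 := by rw [hw]; simp; omega
    have hcne : pvCands values ptrs 0 ≠ [] := pvCands_ne_nil hwne
    have hqne : q ≠ [] := by
      intro h0; subst h0
      exact hcne (List.Perm.eq_nil hq.symm)
    obtain ⟨res, hpop⟩ : ∃ r, pvPopMin3 q = some r := by
      cases hpm : pvPopMin3 q with
      | none => exact absurd (pvPopMin3_eq_none.mp hpm) hqne
      | some r => exact ⟨r, rfl⟩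
    obtain ⟨⟨w, x, y⟩, q'⟩ := res
    obtain ⟨hmem, hperm, hmin⟩ := pvPopMin3_spec hpop
    have hmemc := hq.mem_iff.mp hmem
    obtain ⟨k, hk, hpk, he⟩ := mem_pvCands ptrs 0 hmemc
    simp only [Nat.zero_add, Nat.cast_zero, zero_add, Prod.mk.injEq] at he
    obtain ⟨hw0, hx0, hy0⟩ := he
    have hLne : (pvCands values ptrs 0).map (fun e => (e.1, e.2.1)) ≠ [] := by
      simpa using hcne
    obtain ⟨m2, hmin2⟩ := pvMin2?_some hLne
    obtain ⟨hm2mem, hm2min⟩ := pvMin2?_spec hmin2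
    have hwxmem : ((w : Int), x) ∈ (pvCands values ptrs 0).map (fun e => (e.1, e.2.1)) :=
      List.mem_map.mpr ⟨(w, x, y), hmemc, rfl⟩
    have hwxmin : ∀ z ∈ (pvCands values ptrs 0).map (fun e => (e.1, e.2.1)),
        ¬ (z.1 < w ∨ (z.1 = w ∧ z.2 < x)) := by
      intro z hz
      obtain ⟨u, hu, rfl⟩ := List.mem_map.mp hz
      have hmu := hmin u (hq.mem_iff.mpr hu)
      rw [pvLt3_false_iff] at hmu
      simp only at hmu ⊢
      omega
    have hm2eq : m2 = (w, x) := by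
      have h1 := hm2min (w, x) hwxmem
      have h2 := hwxmin m2 hm2mem
      simp only at h1 h2
      have hc : m2.1 = w ∧ m2.2 = x := by omega
      exact Prod.ext hc.1 hc.2
    subst hm2eq
    have hstepA : pvHeapStep values (q, ans) i
        = ((if y > 0 then (pvGet2 values x (y - 1), x, y - 1) :: q' else q'), ans + i * w) := by
      simp only [pvHeapStep, hpop]
      split_ifs <;> rfl
    have hstepB : pvScanStep values (ptrs, ans) i = (ptrs.set k (ptrs[k] - 1), ans + i * w) := by
      simp only [pvScanStep]
      rw [show values.length = ptrs.length from hlen.symm]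
      rw [pvCandsB_eq values ptrs, hmin2]
      rw [hx0]
      simp only [Int.toNat_natCast, PySem.List.pyGet?_natCast, List.getElem?_eq_getElem hk,
        Option.getD_some]
    rw [List.foldl_cons, List.foldl_cons, hstepA, hstepB]
    apply ih
    · simp [hlen]
    · have hset := pvCands_set (values := values) ptrs k 0 hk hpk
      simp only [Nat.zero_add, Nat.cast_zero, zero_add] at hset
      have hq' : q'.Perm ((pvCands values ptrs 0).erase (w, x, y)) := by
        refine hperm.trans (hq.erase _)
      by_cases hy : y > 0
      · rw [if_pos hy]
        refine ((hq'.cons _).trans ?_).trans hset.symm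
        rw [if_pos (by omega : (0 : Int) ≤ ptrs[k] - 1)]
        rw [List.singleton_append]
        have : (pvGet2 values x (y - 1), x, y - 1)
            = (pvGet2 values (k : Int) (ptrs[k] - 1), (k : Int), ptrs[k] - 1) := by
          rw [hx0, hy0]
        rw [this, hw0, hx0, hy0]
      · rw [if_neg hy]
        refine (hq'.trans ?_).trans hset.symm
        rw [if_neg (by omega : ¬ (0 : Int) ≤ ptrs[k] - 1)]
        rw [List.nil_append, hw0, hx0, hy0]
    · have := pvWsum_set ptrs k hk hpk
      rw [this, hw]
      simp

-- ===== VERDICT (by name: the statement is the Claim_ definition above) =====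
theorem maxSpending_spec : Claim_equal_maxSpending := by
  intro values _ hpre
  obtain ⟨-, hpos, -⟩ := hpre
  show maxSpending values = maxSpending_alt values
  simp only [maxSpending, maxSpending_alt]
  apply pvLoop_eq
  · simp
  · rw [pvCands_replicate values
      (by omega : (0 : Int) ≤ ((values.headD []).length : Int) - 1) values.length 0]
    simp only [Nat.zero_add, Nat.cast_zero, zero_add]
    exact List.Perm.refl _
  · rw [pvWsum_replicate
      (by omega : (0 : Int) ≤ ((values.headD []).length : Int) - 1) values.length]
    rw [PySem.List.length_pyRange_one]
    have h2 : ((values.length : Int) * (((values.headD []).length : Nat) : Int) + 1 - 1)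
        = (values.length : Int) * (((values.headD []).length : Nat) : Int) := by ring
    rw [h2, Int.toNat_of_nonneg (by positivity)]
    ring
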